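-- pv_equiv track=rewrite | github.com/acmurdockUMASS/resProject | backend/app/render.py | _format_itemize
-- ===== SOURCE A (Python) =====
-- from typing import Iterable, List
--
-- LATEX_REPLACEMENTS = {
-- 	"&": "\\&",
-- 	"%": "\\%",
-- 	"$": "\\$",
-- 	"#": "\\#",
-- 	"_": "\\_",
-- 	"{": "\\{",
-- 	"}": "\\}",
-- 	"~": "\\textasciitilde{}",
-- 	"^": "\\textasciicircum{}",
-- 	"\\": "\\textbackslash{}",
-- }
--
-- def _escape_latex(text: str) -> str:
-- 	if not text:
-- 		return ""
-- 	escaped = text.replace("\\", LATEX_REPLACEMENTS["\\"])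
-- 	for key, value in LATEX_REPLACEMENTS.items():
-- 		if key == "\\":
-- 			continue
-- 		escaped = escaped.replace(key, value)
-- 	return escaped
--
-- def _format_itemize(items: List[str]) -> str:
-- 	cleaned = [_escape_latex(item) for item in items if item.strip()]
-- 	if not cleaned:
-- 		return ""
-- 	lines = ["\\begin{itemize}"]
-- 	lines.extend([f"    \\item {item}" for item in cleaned])
-- 	lines.append("\\end{itemize}")
-- 	return "\n".join(lines)
-- ===== SOURCE B (Python) =====
-- from typing import List
--
-- # Final single-pass expansion of each special character (backslash's braces
-- # come out escaped, as the sequential replaces produce).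
-- _FINAL = {
--     "&": "\\&", "%": "\\%", "$": "\\$", "#": "\\#", "_": "\\_",
--     "{": "\\{", "}": "\\}",
--     "~": "\\textasciitilde{}", "^": "\\textasciicircum{}",
--     "\\": "\\textbackslash\\{\\}",
-- }
-- _TABLE = str.maketrans(_FINAL)
--
-- def _format_itemize(items: List[str]) -> str:
--     body = "\n".join(
--         "    \\item " + item.translate(_TABLE) for item in items if item.strip()
--     )
--     if not body:
--         return ""
--     return "\\begin{itemize}\n" + body + "\n\\end{itemize}"
-- ===== Notes on version B (the rewrite author's own statement) =====
-- stated objective: faster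
-- what changed: Replaces the k sequential full-string str.replace passes with a single str.translate pass over a precomputed table (backslash mapped to its final re-escaped expansion), and builds the itemize block with one join instead of assembling and joining a lines list.
import Mathlib
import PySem

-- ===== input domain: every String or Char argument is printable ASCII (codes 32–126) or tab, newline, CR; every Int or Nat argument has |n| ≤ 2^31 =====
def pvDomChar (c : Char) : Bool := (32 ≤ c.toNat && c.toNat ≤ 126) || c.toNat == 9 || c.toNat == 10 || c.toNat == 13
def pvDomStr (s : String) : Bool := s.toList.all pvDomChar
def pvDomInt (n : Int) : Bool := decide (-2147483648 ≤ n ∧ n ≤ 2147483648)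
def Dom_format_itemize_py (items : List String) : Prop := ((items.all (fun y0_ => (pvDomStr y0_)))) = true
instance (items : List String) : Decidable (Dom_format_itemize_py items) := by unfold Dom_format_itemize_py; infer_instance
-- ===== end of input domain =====

-- B escapes each character in ONE pass through a precomputed per-character table
-- (backslash mapped to its final re-escaped expansion) and assembles the itemize
-- block with a single join, instead of A's k sequential full-string replaces and
-- its explicit lines list; objective: faster (single pass, measured).

-- ===== PORT A =====
-- LATEX_REPLACEMENTS, a dict, as an association list in insertion order
def latexReplacements : List (String × String) :=
  [("&", "\\&"), ("%", "\\%"), ("$", "\\$"), ("#", "\\#"), ("_", "\\_"),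
   ("{", "\\{"), ("}", "\\}"), ("~", "\\textasciitilde{}"),
   ("^", "\\textasciicircum{}"), ("\\", "\\textbackslash{}")]

-- _escape_latex: first the backslash replace, then a fold over the dict items
-- skipping the backslash key, each step a full-string replace
def escape_latex (text : String) : String :=
  if text = "" then ""
  else
    latexReplacements.foldl
      (fun escaped kv =>
        if kv.1 = "\\" then escaped
        else PySem.Str.replace escaped kv.1 kv.2)
      (PySem.Str.replace text "\\" "\\textbackslash{}")

def format_itemize_py (items : List String) : String :=
  let cleaned := (items.filter (fun item => PySem.Str.strip item != "")).map escape_latex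
  if cleaned = [] then ""
  else
    PySem.Str.join "\n"
      (["\\begin{itemize}"] ++ cleaned.map (fun item => "    \\item " ++ item) ++ ["\\end{itemize}"])

-- ===== PORT B =====
-- the translation table: each special character's final expansion, others unchanged
def escTable (c : Char) : List Char :=
  if c = '&' then "\\&".toList
  else if c = '%' then "\\%".toList
  else if c = '$' then "\\$".toList
  else if c = '#' then "\\#".toList
  else if c = '_' then "\\_".toList
  else if c = '{' then "\\{".toList
  else if c = '}' then "\\}".toList
  else if c = '~' then "\\textasciitilde{}".toList
  else if c = '^' then "\\textasciicircum{}".toList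
  else if c = '\\' then "\\textbackslash\\{\\}".toList
  else [c]

def format_itemize_py_alt (items : List String) : String :=
  let body :=
    PySem.Str.join "\n"
      ((items.filter (fun item => PySem.Str.strip item != "")).map
        (fun item => "    \\item " ++ String.ofList (item.toList.flatMap escTable)))
  if body = "" then ""
  else "\\begin{itemize}\n" ++ body ++ "\n\\end{itemize}"

-- ===== PRECONDITION & SPEC =====
def Spec_format_itemize_py (items : List String) (out : String) : Prop := out = format_itemize_py_alt items
instance (items : List String) (out : String) : Decidable (Spec_format_itemize_py items out) := by unfold Spec_format_itemize_py; infer_instance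

-- ===== CLAIM (what is proved, stated in full; the proofs are below) =====
def Claim_equal_format_itemize_py : Prop := ∀ (items : List String), Dom_format_itemize_py items → Spec_format_itemize_py items (format_itemize_py items)

-- ===== LEMMAS AND PROOFS =====

-- replace with a single-character pattern is a per-character flatMap
theorem replace_go_single (k : Char) (v : List Char) (l acc : List Char) (fuel : Nat)
    (h : l.length ≤ fuel) :
    PySem.Chars.replace.go [k] v fuel l acc
      = acc.reverse ++ l.flatMap (fun c => if c = k then v else [c]) := by
  induction l generalizing acc fuel with
  | nil =>
    cases fuel <;> simp [PySem.Chars.replace.go]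
  | cons c t ih =>
    cases fuel with
    | zero => simp at h
    | succ m =>
      rw [PySem.Chars.replace.go]
      by_cases hc : c = k
      · subst hc
        simp only [List.isPrefixOf]
        rw [if_pos (by simp)]
        simp only [List.length_cons, List.length_nil, List.drop_succ_cons, List.drop_zero]
        rw [ih _ _ (by simpa using h)]
        simp
      · rw [if_neg (by simp [List.isPrefixOf_cons₂]; intro hh; exact hc hh.symm)]
        rw [ih _ _ (by simpa using h)]
        simp [hc]

theorem replace_single (k : Char) (v s : List Char) :
    PySem.Chars.replace s [k] v = s.flatMap (fun c => if c = k then v else [c]) := by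
  rw [PySem.Chars.replace]
  simp only [List.isEmpty_cons, Bool.false_eq_true, if_false]
  exact replace_go_single k v s [] s.length (le_refl _)

-- the composed per-character expansion of A's replace chain equals B's table
theorem perChar (c : Char) :
    List.flatMap
      (fun x => List.flatMap
        (fun x => List.flatMap
          (fun x => List.flatMap
            (fun x => List.flatMap
              (fun x => List.flatMap
                (fun x => List.flatMap
                  (fun x => List.flatMap
                    (fun x => List.flatMap (fun c => if c = '^' then "\\textasciicircum{}".toList else [c])
                      (if x = '~' then "\\textasciitilde{}".toList else [x]))
                    (if x = '}' then "\\}".toList else [x]))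
                  (if x = '{' then "\\{".toList else [x]))
                (if x = '_' then "\\_".toList else [x]))
              (if x = '#' then "\\#".toList else [x]))
            (if x = '$' then "\\$".toList else [x]))
          (if x = '%' then "\\%".toList else [x]))
        (if x = '&' then "\\&".toList else [x]))
      (if c = '\\' then "\\textbackslash{}".toList else [c])
      = escTable c := by
  by_cases h0 : c = '\\'; · subst h0; decide
  by_cases h1 : c = '&'; · subst h1; decide
  by_cases h2 : c = '%'; · subst h2; decide
  by_cases h3 : c = '$'; · subst h3; decide
  by_cases h4 : c = '#'; · subst h4; decide
  by_cases h5 : c = '_'; · subst h5; decide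
  by_cases h6 : c = '{'; · subst h6; decide
  by_cases h7 : c = '}'; · subst h7; decide
  by_cases h8 : c = '~'; · subst h8; decide
  by_cases h9 : c = '^'; · subst h9; decide
  simp [escTable, h0, h1, h2, h3, h4, h5, h6, h7, h8, h9]

set_option maxHeartbeats 2000000 in
theorem escape_latex_eq (text : String) :
    escape_latex text = String.ofList (text.toList.flatMap escTable) := by
  unfold escape_latex
  by_cases he : text = ""
  · subst he; simp
  · rw [if_neg he]
    simp only [latexReplacements, List.foldl]
    simp only [String.reduceEq, reduceIte]
    apply String.toList_inj.mp
    simp only [PySem.Str.toList_replace, String.toList_ofList]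
    rw [show ("\\" : String).toList = ['\\'] from rfl,
        show ("&" : String).toList = ['&'] from rfl,
        show ("%" : String).toList = ['%'] from rfl,
        show ("$" : String).toList = ['$'] from rfl,
        show ("#" : String).toList = ['#'] from rfl,
        show ("_" : String).toList = ['_'] from rfl,
        show ("{" : String).toList = ['{'] from rfl,
        show ("}" : String).toList = ['}'] from rfl,
        show ("~" : String).toList = ['~'] from rfl,
        show ("^" : String).toList = ['^'] from rfl]
    simp only [replace_single, List.flatMap_assoc]
    exact congrArg (List.flatMap · text.toList) (funext perChar)

-- joining a cons onto a nonempty tail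
theorem join_cons_ne (sep x : String) (l : List String) (h : l ≠ []) :
    PySem.Str.join sep (x :: l) = x ++ sep ++ PySem.Str.join sep l := by
  cases l with
  | nil => exact absurd rfl h
  | cons y ys =>
    apply String.toList_inj.mp
    simp [PySem.Str.toList_join, PySem.Chars.join_cons_cons]

-- joining with a trailing singleton appended to a nonempty list
theorem join_append_singleton (sep e : String) (l : List String) (h : l ≠ []) :
    PySem.Str.join sep (l ++ [e]) = PySem.Str.join sep l ++ sep ++ e := by
  induction l with
  | nil => exact absurd rfl h
  | cons x xs ih =>
    cases xs with
    | nil =>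
      apply String.toList_inj.mp
      simp [PySem.Str.toList_join, PySem.Chars.join_cons_cons, PySem.Chars.join_singleton]
    | cons y ys =>
      rw [List.cons_append, join_cons_ne sep x ((y :: ys) ++ [e]) (by simp),
          ih (by simp), join_cons_ne sep x (y :: ys) (by simp)]
      simp [String.append_assoc]

-- a join over a cons starts with the head's characters
theorem join_cons_starts (sep x : String) (l : List String) :
    ∃ r, (PySem.Str.join sep (x :: l)).toList = x.toList ++ r := by
  cases l with
  | nil => exact ⟨[], by simp [PySem.Str.toList_join, PySem.Chars.join_singleton]⟩
  | cons y ys =>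
    refine ⟨sep.toList ++ (PySem.Str.join sep (y :: ys)).toList, ?_⟩
    simp [PySem.Str.toList_join, PySem.Chars.join_cons_cons]

-- ===== VERDICT (by name: the statement is the Claim_ definition above) =====
theorem format_itemize_py_spec : Claim_equal_format_itemize_py := by
  intro items _
  unfold Spec_format_itemize_py format_itemize_py format_itemize_py_alt
  cases hL : items.filter (fun item => PySem.Str.strip item != "") with
  | nil =>
    have hj : PySem.Str.join "\n" ([] : List String) = "" := by
      apply String.toList_inj.mp
      simp [PySem.Str.toList_join, PySem.Chars.join_nil]
    simp only [List.map_nil, hj, if_pos]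
  | cons a as =>
    have hmap : (a :: as).map escape_latex
        = (a :: as).map (fun item => String.ofList (item.toList.flatMap escTable)) := by
      simp [escape_latex_eq]
    rw [hmap]
    set M := ((a :: as).map (fun item => String.ofList (item.toList.flatMap escTable))).map
        (fun item => "    \\item " ++ item) with hM
    have hM' : ((a :: as).map (fun item => "    \\item " ++ String.ofList (item.toList.flatMap escTable))) = M := by
      simp [hM, Function.comp]
    rw [hM']
    have hMcons : M = ("    \\item " ++ String.ofList (a.toList.flatMap escTable)) ::
        (as.map (fun item => String.ofList (item.toList.flatMap escTable))).map
          (fun item => "    \\item " ++ item) := by simp [hM]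
    have hbody : PySem.Str.join "\n" M ≠ "" := by
      rw [hMcons]
      obtain ⟨r, hr⟩ := join_cons_starts "\n" _ _
      intro hemp
      rw [hemp] at hr
      simp at hr
    rw [if_neg (by simp), if_neg hbody]
    have h1 : ["\\begin{itemize}"] ++ M ++ ["\\end{itemize}"]
        = "\\begin{itemize}" :: (M ++ ["\\end{itemize}"]) := by simp
    rw [h1, join_cons_ne "\n" _ _ (by simp [hMcons]),
        join_append_singleton "\n" _ _ (by simp [hMcons])]
    have h2 : ("\\begin{itemize}\n" : String) = "\\begin{itemize}" ++ "\n" := by decide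
    rw [h2]
    simp [String.append_assoc]
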